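-- pv_equiv track=rewrite | github.com/KuJunhui/code-test | programmers/알고리즘고득점Kit/탐욕법(Greedy)/체육복/해설.py | solution
-- ===== SOURCE A (Python) =====
-- def solution(n, lost, reserve):
--     lost_set = set(lost)
--     reserve_set = set(reserve)
--     # 교집합 (도난 당했지만 자기 여벌로 해결한 학생)
--     overlap = lost_set & reserve_set
--     lost = sorted(list(lost_set - overlap))
--     reserve = sorted(list(reserve_set - overlap))
--
--     for r in reserve:
--         if r - 1 in lost:
--             lost.remove(r - 1)
--         elif r + 1 in lost:
--             lost.remove(r + 1)
--
--     return n - len(lost)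
-- ===== SOURCE B (Python) =====
-- def solution(n, lost, reserve):
--     ls = sorted(set(lost) - set(reserve))
--     rs = sorted(set(reserve) - set(lost))
--     i = j = matched = 0
--     while i < len(ls) and j < len(rs):
--         if ls[i] < rs[j] - 1:
--             i += 1
--         elif ls[i] <= rs[j] + 1:
--             matched += 1
--             i += 1
--             j += 1
--         else:
--             j += 1
--     return n - (len(ls) - matched)
-- ===== Notes on version B (the rewrite author's own statement) =====
-- stated objective: faster
-- what changed: Replaced A's per-reserve linear 'in' membership tests and list.remove calls on the lost list by a single two-pointer merge scan over the two sorted deduplicated lists that only counts matches.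
import Mathlib
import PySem

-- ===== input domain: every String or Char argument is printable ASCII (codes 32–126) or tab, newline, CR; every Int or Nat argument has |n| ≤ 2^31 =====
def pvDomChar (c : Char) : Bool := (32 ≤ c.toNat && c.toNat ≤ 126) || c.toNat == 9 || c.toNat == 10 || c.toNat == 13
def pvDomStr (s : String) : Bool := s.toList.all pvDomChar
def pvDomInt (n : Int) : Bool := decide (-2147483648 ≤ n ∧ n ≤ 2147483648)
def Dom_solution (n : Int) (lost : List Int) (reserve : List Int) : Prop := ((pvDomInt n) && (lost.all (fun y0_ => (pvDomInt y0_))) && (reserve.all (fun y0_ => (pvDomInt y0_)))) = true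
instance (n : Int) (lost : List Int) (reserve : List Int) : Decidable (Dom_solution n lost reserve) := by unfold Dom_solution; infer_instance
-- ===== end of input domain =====

-- B replaces A's per-reserve linear membership tests and list.remove with a single
-- two-pointer scan over the two sorted deduplicated lists (objective: faster).

-- ===== PORT A =====
-- the 'for r in reserve' loop: remove r-1 from lost if present, else r+1 if present
def pvLoopA : List Int → List Int → List Int
  | l, [] => l
  | l, r :: rs =>
      pvLoopA
        (if l.contains (r - 1) then (PySem.List.remove? l (r - 1)).getD l
         else if l.contains (r + 1) then (PySem.List.remove? l (r + 1)).getD l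
         else l) rs

def solution (n : Int) (lost : List Int) (reserve : List Int) : Int :=
  let lostSet := PySem.Set.ofList lost
  let reserveSet := PySem.Set.ofList reserve
  let overlap := PySem.Set.inter lostSet reserveSet
  let lost2 := PySem.List.sorted (PySem.Set.diff lostSet overlap) (fun x => x) false
  let reserve2 := PySem.List.sorted (PySem.Set.diff reserveSet overlap) (fun x => x) false
  n - ((pvLoopA lost2 reserve2).length : Int)

-- ===== PORT B =====
-- the two-pointer while loop of Source B: ls[i:] and rs[j:] are the two list arguments
def pvTP : List Int → List Int → Int
  | [], _ => 0
  | _ :: _, [] => 0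
  | l :: ls, r :: rs =>
      if l < r - 1 then pvTP ls (r :: rs)
      else if l ≤ r + 1 then 1 + pvTP ls rs
      else pvTP (l :: ls) rs
  termination_by ls rs => ls.length + rs.length
  decreasing_by
    all_goals simp
    all_goals omega

def solution_alt (n : Int) (lost : List Int) (reserve : List Int) : Int :=
  let ls := PySem.List.sorted (PySem.Set.diff (PySem.Set.ofList lost) (PySem.Set.ofList reserve)) (fun x => x) false
  let rs := PySem.List.sorted (PySem.Set.diff (PySem.Set.ofList reserve) (PySem.Set.ofList lost)) (fun x => x) false
  n - ((ls.length : Int) - pvTP ls rs)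

-- ===== PRECONDITION & SPEC =====
def Spec_solution (n : Int) (lost : List Int) (reserve : List Int) (out : Int) : Prop := out = solution_alt n lost reserve
instance (n : Int) (lost : List Int) (reserve : List Int) (out : Int) : Decidable (Spec_solution n lost reserve out) := by unfold Spec_solution; infer_instance

-- ===== CLAIM (what is proved, stated in full; the proofs are below) =====
def Claim_equal_solution : Prop := ∀ (n : Int) (lost : List Int) (reserve : List Int), Dom_solution n lost reserve → Spec_solution n lost reserve (solution n lost reserve)

-- ===== LEMMAS AND PROOFS =====

-- s - (s & t) = s - t  (as filters over s, the predicates agree on members of s)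
lemma diff_inter_left (s t : List Int) :
    PySem.Set.diff s (PySem.Set.inter s t) = PySem.Set.diff s t := by
  simp only [PySem.Set.diff, PySem.Set.inter]
  apply List.filter_congr
  intro x hx
  rw [Bool.not_inj_iff, Bool.eq_iff_iff]
  simp [List.mem_filter, hx]

-- t - (s & t) = t - s
lemma diff_inter_right (s t : List Int) :
    PySem.Set.diff t (PySem.Set.inter s t) = PySem.Set.diff t s := by
  simp only [PySem.Set.diff, PySem.Set.inter]
  apply List.filter_congr
  intro x hx
  rw [Bool.not_inj_iff, Bool.eq_iff_iff]
  simp [List.mem_filter, hx]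

-- a head strictly below every r-1 in R is never touched by A's loop
lemma loopA_cons_small (l : Int) (R : List Int) :
    ∀ L : List Int, (∀ r ∈ R, l < r - 1) →
      pvLoopA (l :: L) R = l :: pvLoopA L R := by
  induction R with
  | nil => intro L _; rfl
  | cons r rs ih =>
    intro L h
    have hr : l < r - 1 := h r (by simp)
    have h1 : l ≠ r - 1 := by omega
    have h2 : l ≠ r + 1 := by omega
    have e1 : (l :: L).contains (r - 1) = L.contains (r - 1) := by
      simp [Ne.symm h1]
    have e2 : (l :: L).contains (r + 1) = L.contains (r + 1) := by
      simp [Ne.symm h2]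
    have htl : ∀ r' ∈ rs, l < r' - 1 := fun r' hr' => h r' (by simp [hr'])
    simp only [pvLoopA, e1, e2]
    by_cases hc1 : L.contains (r - 1)
    · have hm : (r - 1) ∈ L := List.contains_iff_mem.mp hc1
      rw [if_pos hc1, if_pos hc1,
        PySem.List.remove?_cons_of_ne (x := l) (v := r - 1) L h1,
        PySem.List.remove?_eq_some_erase L _ hm]
      simpa using ih (L.erase (r - 1)) htl
    · rw [if_neg hc1, if_neg hc1]
      by_cases hc2 : L.contains (r + 1)
      · have hm : (r + 1) ∈ L := List.contains_iff_mem.mp hc2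
        rw [if_pos hc2, if_pos hc2,
          PySem.List.remove?_cons_of_ne (x := l) (v := r + 1) L h2,
          PySem.List.remove?_eq_some_erase L _ hm]
        simpa using ih (L.erase (r + 1)) htl
      · rw [if_neg hc2, if_neg hc2]
        exact ih L htl

-- the central invariant: on strictly sorted disjoint lists, the number of
-- elements A's loop removes is exactly B's two-pointer match count
lemma loopA_length (R : List Int) :
    ∀ L : List Int, L.Pairwise (· < ·) → R.Pairwise (· < ·) →
      (∀ r ∈ R, r ∉ L) →
      ((pvLoopA L R).length : Int) + pvTP L R = (L.length : Int) := by
  induction R with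
  | nil =>
    intro L _ _ _
    cases L <;> simp [pvLoopA, pvTP]
  | cons r rs ihR =>
    intro L
    induction L with
    | nil =>
      intro _ hR _
      have e : pvLoopA [] (r :: rs) = pvLoopA [] rs := by simp [pvLoopA]
      have h0 := ihR [] (by simp) (List.Pairwise.sublist (by simp) hR) (by simp)
      simp [pvTP] at h0 ⊢
      rw [e]; exact h0
    | cons l ls ihL =>
      intro hL hR hdisj
      have hhead : ∀ x ∈ ls, l < x := (List.pairwise_cons.mp hL).1
      have hLtl : ls.Pairwise (· < ·) := (List.pairwise_cons.mp hL).2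
      have hRhead : ∀ x ∈ rs, r < x := (List.pairwise_cons.mp hR).1
      have hRtl : rs.Pairwise (· < ·) := (List.pairwise_cons.mp hR).2
      by_cases hlt : l < r - 1
      · -- l can never be matched: it stays, and both sides recurse on ls
        have hall : ∀ r' ∈ r :: rs, l < r' - 1 := by
          intro r' hr'
          rcases List.mem_cons.mp hr' with h | h
          · omega
          · have := hRhead r' h; omega
        rw [loopA_cons_small l (r :: rs) ls hall]
        have hy := ihL hLtl hR
          (fun r' hr' hm => hdisj r' hr' (List.mem_cons_of_mem l hm))
        simp only [pvTP, if_pos hlt] at hy ⊢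
        simp only [List.length_cons]
        push_cast
        omega
      · by_cases hle : l ≤ r + 1
        · -- match: l = r - 1 or l = r + 1; A removes the head, both advance
          have hne : l ≠ r := fun he => hdisj r (by simp) (by simp [he])
          have hstep : pvLoopA (l :: ls) (r :: rs) = pvLoopA ls rs := by
            by_cases hcase : l = r - 1
            · have hc : (l :: ls).contains (r - 1) = true := by
                simp [hcase]
              simp only [pvLoopA, hc, if_pos]
              rw [← hcase, PySem.List.remove?_cons_self]
              rfl
            · have hcase2 : l = r + 1 := by omega
              have hc1 : (l :: ls).contains (r - 1) = false := by
                rw [Bool.eq_false_iff]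
                intro hc
                have hm := List.contains_iff_mem.mp hc
                rcases List.mem_cons.mp hm with h | h
                · omega
                · have := hhead _ h; omega
              have hc2 : (l :: ls).contains (r + 1) = true := by
                simp [hcase2]
              simp only [pvLoopA, hc1, hc2, Bool.false_eq_true, if_false, if_pos]
              rw [← hcase2, PySem.List.remove?_cons_self]
              rfl
          rw [hstep]
          have hy := ihR ls hLtl hRtl
            (fun r' hr' hm => by
              have hgt := hRhead r' hr'
              have := hdisj r' (List.mem_cons_of_mem r hr')
              exact this (List.mem_cons_of_mem l hm))
          simp only [pvTP, if_neg hlt, if_pos hle]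
          simp only [List.length_cons]
          push_cast
          omega
        · -- l > r + 1: r matches nothing in l :: ls; both skip r
          have hbig : ∀ x ∈ l :: ls, r + 1 < x := by
            intro x hx
            rcases List.mem_cons.mp hx with h | h
            · omega
            · have := hhead _ h; omega
          have hc1 : (l :: ls).contains (r - 1) = false := by
            rw [Bool.eq_false_iff]
            intro hc
            have := hbig _ (List.contains_iff_mem.mp hc); omega
          have hc2 : (l :: ls).contains (r + 1) = false := by
            rw [Bool.eq_false_iff]
            intro hc
            have := hbig _ (List.contains_iff_mem.mp hc); omega
          have hstep : pvLoopA (l :: ls) (r :: rs) = pvLoopA (l :: ls) rs := by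
            simp only [pvLoopA, hc1, hc2, Bool.false_eq_true, if_false]
          rw [hstep]
          have hy := ihR (l :: ls) hL hRtl
            (fun r' hr' => hdisj r' (List.mem_cons_of_mem r hr'))
          simp only [pvTP, if_neg hlt, if_neg hle]
          omega

-- strict sortedness of sorted(set-difference)
lemma sorted_diff_pairwise_lt (s : List Int) (t : List Int) (hs : s.Nodup) :
    (PySem.List.sorted (PySem.Set.diff s t) (fun x => x) false).Pairwise (· < ·) := by
  have hnd : (PySem.Set.diff s t).Nodup := hs.filter _
  have hnd2 : (PySem.List.sorted (PySem.Set.diff s t) (fun x => x) false).Nodup :=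
    (PySem.List.sorted_perm _ _ _).nodup_iff.mpr hnd
  have hle := PySem.List.sorted_pairwise (PySem.Set.diff s t) (fun x => x)
  exact (hle.and hnd2).imp (fun h => lt_of_le_of_ne h.1 h.2)

-- ===== VERDICT (by name: the statement is the Claim_ definition above) =====
theorem solution_spec : Claim_equal_solution := by
  intro n lost reserve _
  unfold Spec_solution solution solution_alt
  simp only [diff_inter_left, diff_inter_right]
  set L := PySem.List.sorted (PySem.Set.diff (PySem.Set.ofList lost) (PySem.Set.ofList reserve)) (fun x => x) false with hLdef
  set R := PySem.List.sorted (PySem.Set.diff (PySem.Set.ofList reserve) (PySem.Set.ofList lost)) (fun x => x) false with hRdef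
  have hL : L.Pairwise (· < ·) := sorted_diff_pairwise_lt _ _ (PySem.Set.nodup_ofList lost)
  have hR : R.Pairwise (· < ·) := sorted_diff_pairwise_lt _ _ (PySem.Set.nodup_ofList reserve)
  have hdisj : ∀ r ∈ R, r ∉ L := by
    intro r hr hrL
    rw [hRdef] at hr
    rw [hLdef] at hrL
    rw [PySem.List.mem_sorted, PySem.Set.mem_diff] at hr hrL
    exact hr.2 hrL.1
  have := loopA_length R L hL hR hdisj
  omega
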